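-- pv_equiv track=rewrite | github.com/manav1513/DSA-180-days | Day 8/2.py | rent
-- ===== SOURCE A (Python) =====
-- def rent(a):
--     b = []
--     z = len(a)
--     for i in range(z):
--         for j in range(i+1, z):
--             for k in range(j+1, z):
--                 if a[i] + a[j] + a[k] == 0:
--                     if [a[i], a[j], a[k]] not in b:
--                         b.append([a[i], a[j], a[k]])
--     return b
-- ===== SOURCE B (Python) =====
-- def rent(a):
--     res = []
--     n = len(a)
--     for i in range(n):
--         cnt = {}
--         for v in a[i+1:]:
--             cnt[v] = cnt.get(v, 0) + 1
--         for j in range(i + 1, n):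
--             cnt[a[j]] = cnt[a[j]] - 1   # cnt now counts values at indices > j
--             c = -(a[i] + a[j])
--             if cnt.get(c, 0) > 0:
--                 t = [a[i], a[j], c]
--                 if t not in res:
--                     res.append(t)
--     return res
-- ===== Notes on version B (the rewrite author's own statement) =====
-- stated objective: faster
-- what changed: The innermost k-scan is replaced by a per-i count dictionary of the suffix a[i+1:], decremented as j advances, so the third element is found by an O(1) hash lookup of -(a[i]+a[j]) instead of a scan.
import Mathlib
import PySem

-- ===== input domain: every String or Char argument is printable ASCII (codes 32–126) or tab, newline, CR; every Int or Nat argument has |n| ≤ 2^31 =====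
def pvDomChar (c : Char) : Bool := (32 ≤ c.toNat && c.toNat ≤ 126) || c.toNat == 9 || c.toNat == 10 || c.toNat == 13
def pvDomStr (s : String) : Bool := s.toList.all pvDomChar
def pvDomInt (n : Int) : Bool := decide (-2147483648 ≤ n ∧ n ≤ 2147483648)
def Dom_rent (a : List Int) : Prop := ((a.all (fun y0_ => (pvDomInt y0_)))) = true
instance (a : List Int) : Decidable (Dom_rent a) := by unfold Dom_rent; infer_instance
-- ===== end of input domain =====

-- B replaces A's innermost k-scan by a per-i count dictionary of the suffix, decremented as j
-- advances, looking up the needed third value -(a[i]+a[j]) directly (objective: faster).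

-- ===== PORT A =====
def rent (a : List Int) : List (List Int) :=
  let z : Int := a.length
  (PySem.List.pyRange 0 z 1).foldl (fun b i =>
    (PySem.List.pyRange (i+1) z 1).foldl (fun b j =>
      (PySem.List.pyRange (j+1) z 1).foldl (fun b k =>
        if PySem.List.pyGetD a i 0 + PySem.List.pyGetD a j 0 + PySem.List.pyGetD a k 0 = 0 then
          if [PySem.List.pyGetD a i 0, PySem.List.pyGetD a j 0, PySem.List.pyGetD a k 0] ∈ b then b
          else b ++ [[PySem.List.pyGetD a i 0, PySem.List.pyGetD a j 0, PySem.List.pyGetD a k 0]]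
        else b) b) b) []

-- ===== PORT B =====
def rent_alt (a : List Int) : List (List Int) :=
  let n : Int := a.length
  (PySem.List.pyRange 0 n 1).foldl (fun res i =>
    -- cnt = counts of the values of a[i+1:]
    let cnt0 : PySem.Dict Int Int :=
      (PySem.List.slice a (some (i+1)) none).foldl
        (fun d v => d.insert v (d.getD v 0 + 1)) PySem.Dict.empty
    ((PySem.List.pyRange (i+1) n 1).foldl (fun st j =>
      -- cnt[a[j]] -= 1 : the key is always present here, so insert is exact
      if 0 < (st.2.insert (PySem.List.pyGetD a j 0) (st.2.getD (PySem.List.pyGetD a j 0) 0 - 1)).getD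
          (-(PySem.List.pyGetD a i 0 + PySem.List.pyGetD a j 0)) 0 then
        if [PySem.List.pyGetD a i 0, PySem.List.pyGetD a j 0,
            -(PySem.List.pyGetD a i 0 + PySem.List.pyGetD a j 0)] ∈ st.1 then
          (st.1, st.2.insert (PySem.List.pyGetD a j 0) (st.2.getD (PySem.List.pyGetD a j 0) 0 - 1))
        else
          (st.1 ++ [[PySem.List.pyGetD a i 0, PySem.List.pyGetD a j 0,
              -(PySem.List.pyGetD a i 0 + PySem.List.pyGetD a j 0)]],
            st.2.insert (PySem.List.pyGetD a j 0) (st.2.getD (PySem.List.pyGetD a j 0) 0 - 1))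
      else (st.1, st.2.insert (PySem.List.pyGetD a j 0) (st.2.getD (PySem.List.pyGetD a j 0) 0 - 1)))
      (res, cnt0)).1) []

-- ===== PRECONDITION & SPEC =====
def Spec_rent (a : List Int) (out : List (List Int)) : Prop := out = rent_alt a
instance (a : List Int) (out : List (List Int)) : Decidable (Spec_rent a out) := by unfold Spec_rent; infer_instance

-- ===== CLAIM (what is proved, stated in full; the proofs are below) =====
def Claim_equal_rent : Prop := ∀ (a : List Int), Dom_rent a → Spec_rent a (rent a)

-- ===== LEMMAS AND PROOFS =====

-- A's innermost k-loop in closed form: it appends [x, y, -(x+y)] iff -(x+y) occurs among a[m:]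
-- and the triple is not already in b.
theorem rent_inner_closed (a : List Int) (x y : Int) :
    ∀ (n : Nat) (m : Int), 0 ≤ m → (a.length : Int) - m ≤ n → ∀ (b : List (List Int)),
    (PySem.List.pyRange m (a.length : Int) 1).foldl (fun b k =>
        if x + y + PySem.List.pyGetD a k 0 = 0 then
          if [x, y, PySem.List.pyGetD a k 0] ∈ b then b
          else b ++ [[x, y, PySem.List.pyGetD a k 0]]
        else b) b
    = if -(x+y) ∈ a.drop m.toNat ∧ [x, y, -(x+y)] ∉ b then b ++ [[x, y, -(x+y)]] else b := by
  intro n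
  induction n with
  | zero =>
    intro m hm hn b
    rw [PySem.List.pyRange_one_eq_nil (by omega)]
    have hd : a.drop m.toNat = [] := List.drop_eq_nil_of_le (by omega)
    simp [hd]
  | succ n ih =>
    intro m hm hn b
    by_cases hlt : m < (a.length : Int)
    · rw [PySem.List.pyRange_one_cons hlt]
      have hmem : m.toNat < a.length := by omega
      have hget : PySem.List.pyGetD a m 0 = a[m.toNat] :=
        PySem.List.pyGetD_eq_getElem a 0 hm (by omega)
      have hdrop : a.drop m.toNat = a[m.toNat] :: a.drop (m.toNat + 1) :=
        List.drop_eq_getElem_cons hmem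
      have htn : (m + 1).toNat = m.toNat + 1 := by omega
      simp only [List.foldl_cons, hget]
      by_cases hc : a[m.toNat] = -(x+y)
      · have hcond : x + y + a[m.toNat] = 0 := by omega
        rw [if_pos hcond]
        by_cases hb : [x, y, a[m.toNat]] ∈ b
        · rw [if_pos hb, ih (m+1) (by omega) (by omega) b]
          rw [hc] at hb
          have h1 : ¬(-(x+y) ∈ a.drop (m+1).toNat ∧ [x, y, -(x+y)] ∉ b) := fun h => h.2 hb
          have h2 : ¬(-(x+y) ∈ a.drop m.toNat ∧ [x, y, -(x+y)] ∉ b) := fun h => h.2 hb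
          rw [if_neg h1, if_neg h2]
        · rw [if_neg hb, ih (m+1) (by omega) (by omega) (b ++ [[x, y, a[m.toNat]]])]
          rw [hc] at hb ⊢
          have hmemb : [x, y, -(x+y)] ∈ b ++ [[x, y, -(x+y)]] := by simp
          have h1 : ¬(-(x+y) ∈ a.drop (m+1).toNat ∧
              [x, y, -(x+y)] ∉ b ++ [[x, y, -(x+y)]]) := fun h => h.2 hmemb
          have hin : -(x+y) ∈ a.drop m.toNat := by
            rw [hdrop, hc]; exact List.mem_cons_self
          rw [if_neg h1, if_pos ⟨hin, hb⟩]
      · have hcond : ¬(x + y + a[m.toNat] = 0) := by omega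
        rw [if_neg hcond, ih (m+1) (by omega) (by omega) b, htn]
        have hiff : (-(x+y) ∈ a.drop (m.toNat + 1)) ↔ (-(x+y) ∈ a.drop m.toNat) := by
          rw [hdrop]
          constructor
          · exact fun h => List.mem_cons_of_mem _ h
          · intro h
            rcases List.mem_cons.mp h with h1 | h2
            · exact absurd h1.symm hc
            · exact h2
        simp only [hiff]
    · rw [PySem.List.pyRange_one_eq_nil (by omega)]
      have hd : a.drop m.toNat = [] := List.drop_eq_nil_of_le (by omega)
      simp [hd]

-- B's j-loop tracks A's middle loop: if cnt counts the values of a[j:], the two folds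
-- produce the same result list.
theorem rent_mid_eq (a : List Int) (x : Int) :
    ∀ (n : Nat) (j : Int), 0 ≤ j → (a.length : Int) - j ≤ n →
    ∀ (b : List (List Int)) (cnt : PySem.Dict Int Int),
    (∀ v, cnt.getD v 0 = ((a.drop j.toNat).count v : Int)) →
    ((PySem.List.pyRange j (a.length : Int) 1).foldl (fun st j =>
      if 0 < (st.2.insert (PySem.List.pyGetD a j 0) (st.2.getD (PySem.List.pyGetD a j 0) 0 - 1)).getD
          (-(x + PySem.List.pyGetD a j 0)) 0 then
        if [x, PySem.List.pyGetD a j 0, -(x + PySem.List.pyGetD a j 0)] ∈ st.1 then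
          (st.1, st.2.insert (PySem.List.pyGetD a j 0) (st.2.getD (PySem.List.pyGetD a j 0) 0 - 1))
        else
          (st.1 ++ [[x, PySem.List.pyGetD a j 0, -(x + PySem.List.pyGetD a j 0)]],
            st.2.insert (PySem.List.pyGetD a j 0) (st.2.getD (PySem.List.pyGetD a j 0) 0 - 1))
      else (st.1, st.2.insert (PySem.List.pyGetD a j 0) (st.2.getD (PySem.List.pyGetD a j 0) 0 - 1)))
      (b, cnt)).1
    = (PySem.List.pyRange j (a.length : Int) 1).foldl (fun b j =>
        (PySem.List.pyRange (j+1) (a.length : Int) 1).foldl (fun b k =>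
          if x + PySem.List.pyGetD a j 0 + PySem.List.pyGetD a k 0 = 0 then
            if [x, PySem.List.pyGetD a j 0, PySem.List.pyGetD a k 0] ∈ b then b
            else b ++ [[x, PySem.List.pyGetD a j 0, PySem.List.pyGetD a k 0]]
          else b) b) b := by
  intro n
  induction n with
  | zero =>
    intro j hj hn b cnt hcnt
    rw [PySem.List.pyRange_one_eq_nil (by omega)]
    simp
  | succ n ih =>
    intro j hj hn b cnt hcnt
    by_cases hlt : j < (a.length : Int)
    · rw [PySem.List.pyRange_one_cons hlt]
      have hmem : j.toNat < a.length := by omega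
      have hget : PySem.List.pyGetD a j 0 = a[j.toNat] :=
        PySem.List.pyGetD_eq_getElem a 0 hj (by omega)
      have hdrop : a.drop j.toNat = a[j.toNat] :: a.drop (j.toNat + 1) :=
        List.drop_eq_getElem_cons hmem
      have htn : (j + 1).toNat = j.toNat + 1 := by omega
      -- the decremented dictionary counts the values of a[j+1:]
      have hcnt' : ∀ v, ((cnt.insert (PySem.List.pyGetD a j 0)
            (cnt.getD (PySem.List.pyGetD a j 0) 0 - 1)).getD v 0)
          = ((a.drop (j+1).toNat).count v : Int) := by
        intro v
        rw [htn]
        by_cases hv : v = PySem.List.pyGetD a j 0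
        · rw [hv, PySem.Dict.getD_insert_self, hcnt, hget, hdrop, List.count_cons_self]
          push_cast; ring
        · rw [PySem.Dict.getD_insert_of_ne _ _ _ hv, hcnt]
          rw [hget] at hv
          rw [hdrop, List.count_cons_of_ne (Ne.symm hv)]
      simp only [List.foldl_cons]
      rw [rent_inner_closed a x (PySem.List.pyGetD a j 0) a.length (j+1) (by omega) (by omega) b]
      rw [hcnt']
      by_cases hin : -(x + PySem.List.pyGetD a j 0) ∈ a.drop (j+1).toNat
      · have h1 : (0:Int) < ((a.drop (j+1).toNat).count (-(x + PySem.List.pyGetD a j 0)) : Int) := by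
          exact_mod_cast List.count_pos_iff.mpr hin
        rw [if_pos h1]
        by_cases hb : [x, PySem.List.pyGetD a j 0, -(x + PySem.List.pyGetD a j 0)] ∈ b
        · rw [if_pos hb, if_neg (fun h => h.2 hb : ¬(_ ∈ a.drop (j+1).toNat ∧ _ ∉ b))]
          exact ih (j+1) (by omega) (by omega) b _ hcnt'
        · rw [if_neg hb, if_pos ⟨hin, hb⟩]
          exact ih (j+1) (by omega) (by omega) _ _ hcnt'
      · have h1 : ¬((0:Int) < ((a.drop (j+1).toNat).count (-(x + PySem.List.pyGetD a j 0)) : Int)) := by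
          have := List.count_eq_zero.mpr hin
          omega
        rw [if_neg h1, if_neg (fun h => hin h.1 : ¬(_ ∈ a.drop (j+1).toNat ∧ _ ∉ b))]
        exact ih (j+1) (by omega) (by omega) b _ hcnt'
    · rw [PySem.List.pyRange_one_eq_nil (by omega)]
      simp

-- ===== VERDICT (by name: the statement is the Claim_ definition above) =====
theorem rent_spec : Claim_equal_rent := by
  intro a _
  unfold Spec_rent
  simp only [rent, rent_alt]
  apply PySem.List.foldl_congr_mem
  intro acc i hi
  have hi0 : 0 ≤ i := (PySem.List.mem_pyRange_one.mp hi).1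
  have hcnt0 : ∀ v, (((PySem.List.slice a (some (i+1)) none).foldl
      (fun d v => d.insert v (d.getD v 0 + 1)) PySem.Dict.empty).getD v 0)
      = ((a.drop (i+1).toNat).count v : Int) := by
    intro v
    rw [PySem.Dict.foldl_insert_getD_add_one_eq_counter, PySem.Dict.getD_counter,
      PySem.List.slice_from a (by omega : (0:Int) ≤ i+1)]
  exact (rent_mid_eq a (PySem.List.pyGetD a i 0) a.length (i+1) (by omega) (by omega) acc _ hcnt0).symm
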